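-- pv_equiv track=rewrite | github.com/HyperionGray/metasploit-framework-pynative | quick_test.py | categorize_constant
-- ===== SOURCE A (Python) =====
-- def categorize_constant(const_name):
--     """Categorize a constant based on its name."""
--     name_upper = const_name.upper()
--
--     # Error codes
--     if any(x in name_upper for x in ['ERROR_', 'WSAE', '_ERR', 'FAILED', 'INVALID']):
--         return 'errors'
--
--     # Window messages and UI
--     if any(x in name_upper for x in ['WM_', 'WS_', 'SW_', 'SWP_', 'HWND_', 'MSG_', 'WINDOW', 'DIALOG', 'MENU', 'BUTTON', 'SCROLL']):
--         return 'windows'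
--
--     # Registry
--     if any(x in name_upper for x in ['HKEY_', 'REG_', 'KEY_', 'REGISTRY']):
--         return 'registry'
--
--     # Security and cryptography
--     if any(x in name_upper for x in ['CERT_', 'CRYPT_', 'SEC_', 'AUTH_', 'TRUST_', 'SECURITY_', 'PRIVILEGE_', 'TOKEN_', 'ACL_', 'SID_']):
--         return 'security'
--
--     # File system
--     if any(x in name_upper for x in ['FILE_', 'DRIVE_', 'VOLUME_', 'DISK_', 'DIRECTORY_', 'FOLDER_', 'PATH_', 'GENERIC_READ', 'GENERIC_WRITE']):
--         return 'filesystem'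
--
--     # Network
--     if any(x in name_upper for x in ['HTTP_', 'DNS_', 'TCP_', 'UDP_', 'IP_', 'SOCKET_', 'NET_', 'INTERNET_', 'WINHTTP_', 'FTP_', 'SMTP_']):
--         return 'network'
--
--     # Database
--     if any(x in name_upper for x in ['SQL_', 'DB_', 'DATABASE_', 'ODBC_']):
--         return 'database'
--
--     # Graphics and DirectX
--     if any(x in name_upper for x in ['DD', 'D3D', 'GDI_', 'DIB_', 'BMP_', 'IMAGE_', 'BITMAP_', 'COLOR_', 'BRUSH_', 'PEN_', 'FONT_']):
--         return 'graphics'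
--
--     # System and hardware
--     if any(x in name_upper for x in ['PROCESSOR_', 'DEVICE_', 'HARDWARE_', 'SYSTEM_', 'MACHINE_', 'PLATFORM_', 'ARCH_']):
--         return 'system'
--
--     # Process and thread
--     if any(x in name_upper for x in ['JOB_', 'THREAD_', 'PROCESS_', 'HANDLE_', 'WAIT_', 'SYNCHRONIZE']):
--         return 'process'
--
--     # Default to miscellaneous
--     return 'miscellaneous'
-- ===== SOURCE B (Python) =====
-- # One-pass scanner: instead of running a separate substring search for every
-- # pattern, walk the name once and, at each position, test which patterns start
-- # there, keeping the smallest category priority seen.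
--
-- PATTERNS = []
-- LABELS = ['errors', 'windows', 'registry', 'security', 'filesystem',
--           'network', 'database', 'graphics', 'system', 'process',
--           'miscellaneous']
-- for _pr, _pats in enumerate([
--         ['ERROR_', 'WSAE', '_ERR', 'FAILED', 'INVALID'],
--         ['WM_', 'WS_', 'SW_', 'SWP_', 'HWND_', 'MSG_', 'WINDOW', 'DIALOG', 'MENU', 'BUTTON', 'SCROLL'],
--         ['HKEY_', 'REG_', 'KEY_', 'REGISTRY'],
--         ['CERT_', 'CRYPT_', 'SEC_', 'AUTH_', 'TRUST_', 'SECURITY_', 'PRIVILEGE_', 'TOKEN_', 'ACL_', 'SID_'],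
--         ['FILE_', 'DRIVE_', 'VOLUME_', 'DISK_', 'DIRECTORY_', 'FOLDER_', 'PATH_', 'GENERIC_READ', 'GENERIC_WRITE'],
--         ['HTTP_', 'DNS_', 'TCP_', 'UDP_', 'IP_', 'SOCKET_', 'NET_', 'INTERNET_', 'WINHTTP_', 'FTP_', 'SMTP_'],
--         ['SQL_', 'DB_', 'DATABASE_', 'ODBC_'],
--         ['DD', 'D3D', 'GDI_', 'DIB_', 'BMP_', 'IMAGE_', 'BITMAP_', 'COLOR_', 'BRUSH_', 'PEN_', 'FONT_'],
--         ['PROCESSOR_', 'DEVICE_', 'HARDWARE_', 'SYSTEM_', 'MACHINE_', 'PLATFORM_', 'ARCH_'],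
--         ['JOB_', 'THREAD_', 'PROCESS_', 'HANDLE_', 'WAIT_', 'SYNCHRONIZE']]):
--     for _p in _pats:
--         PATTERNS.append((_p, _pr))
--
-- def categorize_constant(const_name):
--     """Categorize a constant by scanning its name once, position by position."""
--     name_upper = const_name.upper()
--     best = 10
--     for i in range(len(name_upper)):
--         for pat, pr in PATTERNS:
--             if name_upper.startswith(pat, i):
--                 best = min(best, pr)
--     return LABELS[best]
-- ===== Notes on version B (the rewrite author's own statement) =====
-- stated objective: alternative
-- what changed: Instead of running an independent substring search for each hard-coded pattern group in priority order, B scans the uppercased name once position by position, tests which table patterns start at each position, and keeps the smallest matching category priority, reading the final label off a label table; it trades A's C-level substring searches for an explicit scan, so it is not faster.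
import Mathlib
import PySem

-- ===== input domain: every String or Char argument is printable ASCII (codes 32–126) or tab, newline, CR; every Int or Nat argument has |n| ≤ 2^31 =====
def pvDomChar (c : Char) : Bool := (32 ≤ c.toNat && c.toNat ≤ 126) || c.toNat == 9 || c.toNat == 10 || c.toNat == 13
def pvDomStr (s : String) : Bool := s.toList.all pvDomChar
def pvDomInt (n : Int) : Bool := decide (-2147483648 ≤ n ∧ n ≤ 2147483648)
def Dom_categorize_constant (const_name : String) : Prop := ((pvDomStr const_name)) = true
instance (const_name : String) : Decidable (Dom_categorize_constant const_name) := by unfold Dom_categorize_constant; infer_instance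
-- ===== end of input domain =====

-- B replaces A's per-pattern substring searches by a single left-to-right scan of the
-- name that tests, at each position, which patterns start there, keeping the smallest
-- category priority seen; an alternative algorithm of similar cost.

-- ===== PORT A =====
def categorize_constant (const_name : String) : String :=
  let name_upper := PySem.Str.upper const_name
  if (["ERROR_", "WSAE", "_ERR", "FAILED", "INVALID"] : List String).any (fun x => PySem.Str.isIn x name_upper) then "errors"
  else if (["WM_", "WS_", "SW_", "SWP_", "HWND_", "MSG_", "WINDOW", "DIALOG", "MENU", "BUTTON", "SCROLL"] : List String).any (fun x => PySem.Str.isIn x name_upper) then "windows"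
  else if (["HKEY_", "REG_", "KEY_", "REGISTRY"] : List String).any (fun x => PySem.Str.isIn x name_upper) then "registry"
  else if (["CERT_", "CRYPT_", "SEC_", "AUTH_", "TRUST_", "SECURITY_", "PRIVILEGE_", "TOKEN_", "ACL_", "SID_"] : List String).any (fun x => PySem.Str.isIn x name_upper) then "security"
  else if (["FILE_", "DRIVE_", "VOLUME_", "DISK_", "DIRECTORY_", "FOLDER_", "PATH_", "GENERIC_READ", "GENERIC_WRITE"] : List String).any (fun x => PySem.Str.isIn x name_upper) then "filesystem"
  else if (["HTTP_", "DNS_", "TCP_", "UDP_", "IP_", "SOCKET_", "NET_", "INTERNET_", "WINHTTP_", "FTP_", "SMTP_"] : List String).any (fun x => PySem.Str.isIn x name_upper) then "network"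
  else if (["SQL_", "DB_", "DATABASE_", "ODBC_"] : List String).any (fun x => PySem.Str.isIn x name_upper) then "database"
  else if (["DD", "D3D", "GDI_", "DIB_", "BMP_", "IMAGE_", "BITMAP_", "COLOR_", "BRUSH_", "PEN_", "FONT_"] : List String).any (fun x => PySem.Str.isIn x name_upper) then "graphics"
  else if (["PROCESSOR_", "DEVICE_", "HARDWARE_", "SYSTEM_", "MACHINE_", "PLATFORM_", "ARCH_"] : List String).any (fun x => PySem.Str.isIn x name_upper) then "system"
  else if (["JOB_", "THREAD_", "PROCESS_", "HANDLE_", "WAIT_", "SYNCHRONIZE"] : List String).any (fun x => PySem.Str.isIn x name_upper) then "process"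
  else "miscellaneous"

-- ===== PORT B =====
-- the module-level PATTERNS list of Source B: (pattern, category priority), flat
def pvPatterns : List (String × Nat) :=
  [("ERROR_", 0), ("WSAE", 0), ("_ERR", 0), ("FAILED", 0), ("INVALID", 0),
   ("WM_", 1), ("WS_", 1), ("SW_", 1), ("SWP_", 1), ("HWND_", 1), ("MSG_", 1), ("WINDOW", 1), ("DIALOG", 1), ("MENU", 1), ("BUTTON", 1), ("SCROLL", 1),
   ("HKEY_", 2), ("REG_", 2), ("KEY_", 2), ("REGISTRY", 2),
   ("CERT_", 3), ("CRYPT_", 3), ("SEC_", 3), ("AUTH_", 3), ("TRUST_", 3), ("SECURITY_", 3), ("PRIVILEGE_", 3), ("TOKEN_", 3), ("ACL_", 3), ("SID_", 3),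
   ("FILE_", 4), ("DRIVE_", 4), ("VOLUME_", 4), ("DISK_", 4), ("DIRECTORY_", 4), ("FOLDER_", 4), ("PATH_", 4), ("GENERIC_READ", 4), ("GENERIC_WRITE", 4),
   ("HTTP_", 5), ("DNS_", 5), ("TCP_", 5), ("UDP_", 5), ("IP_", 5), ("SOCKET_", 5), ("NET_", 5), ("INTERNET_", 5), ("WINHTTP_", 5), ("FTP_", 5), ("SMTP_", 5),
   ("SQL_", 6), ("DB_", 6), ("DATABASE_", 6), ("ODBC_", 6),
   ("DD", 7), ("D3D", 7), ("GDI_", 7), ("DIB_", 7), ("BMP_", 7), ("IMAGE_", 7), ("BITMAP_", 7), ("COLOR_", 7), ("BRUSH_", 7), ("PEN_", 7), ("FONT_", 7),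
   ("PROCESSOR_", 8), ("DEVICE_", 8), ("HARDWARE_", 8), ("SYSTEM_", 8), ("MACHINE_", 8), ("PLATFORM_", 8), ("ARCH_", 8),
   ("JOB_", 9), ("THREAD_", 9), ("PROCESS_", 9), ("HANDLE_", 9), ("WAIT_", 9), ("SYNCHRONIZE", 9)]

-- the module-level LABELS list of Source B
def pvLabels : List String :=
  ["errors", "windows", "registry", "security", "filesystem",
   "network", "database", "graphics", "system", "process", "miscellaneous"]

def categorize_constant_alt (const_name : String) : String :=
  let name_upper := PySem.Str.upper const_name
  -- for i in range(len(name_upper)): for pat, pr in PATTERNS: if name_upper.startswith(pat, i): best = min(best, pr)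
  -- name_upper.startswith(pat, i) with 0 ≤ i is exactly: pat is a prefix of the suffix of name_upper at i
  let best := (PySem.List.pyRange 0 (PySem.Str.len name_upper) 1).foldl
    (fun best i => pvPatterns.foldl
      (fun best pp =>
        if PySem.Chars.startswith (name_upper.toList.drop i.toNat) pp.1.toList then min best pp.2 else best)
      best) 10
  -- LABELS[best]: best is always in [0, 10], so plain indexing (the getD default is never used)
  pvLabels.getD best "miscellaneous"

-- ===== PRECONDITION & SPEC =====
def Spec_categorize_constant (const_name : String) (out : String) : Prop := out = categorize_constant_alt const_name
instance (const_name : String) (out : String) : Decidable (Spec_categorize_constant const_name out) := by unfold Spec_categorize_constant; infer_instance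

-- ===== CLAIM (what is proved, stated in full; the proofs are below) =====
def Claim_equal_categorize_constant : Prop := ∀ (const_name : String), Dom_categorize_constant const_name → Spec_categorize_constant const_name (categorize_constant const_name)

-- ===== LEMMAS AND PROOFS =====

-- a fold of conditional "min with a constant" updates computes: min with the constant iff some condition holds
lemma pv_foldl_min_if {α : Type} (L : List α) (c : α → Bool) (k b : Nat) :
    L.foldl (fun b x => if c x then min b k else b) b = if L.any c then min b k else b := by
  induction L generalizing b with
  | nil => simp
  | cons x L ih =>
    simp only [List.foldl_cons, List.any_cons]
    by_cases h : c x = true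
    · simp only [h, if_true, Bool.true_or, ih]
      cases h2 : L.any c <;> simp
    · have h' : c x = false := by simpa using h
      simp [h', ih]

-- interleaving a head element into each flatMap block is a permutation
lemma pv_interleave {α β : Type} (f : β → α) (g : β → List α) (P : List β) :
    (P.map f ++ P.flatMap g).Perm (P.flatMap fun b => f b :: g b) := by
  induction P with
  | nil => simp
  | cons b P ih =>
    simp only [List.map_cons, List.flatMap_cons, List.cons_append]
    refine List.Perm.cons _ ?_
    exact (List.perm_append_comm_assoc _ _ _).trans (List.Perm.append_left _ ih)

-- the cartesian product enumerated row-major is a permutation of it enumerated column-major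
lemma pv_prod_swap {α β : Type} (I : List α) (P : List β) :
    (I.flatMap fun i => P.map fun p => (i, p)).Perm (P.flatMap fun p => I.map fun i => (i, p)) := by
  induction I with
  | nil => simp
  | cons i I ih =>
    simp only [List.flatMap_cons, List.map_cons]
    exact (List.Perm.append_left _ ih).trans (pv_interleave _ _ P)

-- loop interchange: scan positions outside / patterns inside = scan patterns outside, with
-- the inner position loop collapsed to "does the condition hold at any position"
lemma pv_fold_swap {α β : Type} (I : List α) (P : List β) (c : α → β → Bool) (w : β → Nat) (b : Nat) :
    I.foldl (fun b i => P.foldl (fun b p => if c i p then min b (w p) else b) b) b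
    = P.foldl (fun b p => if I.any (fun i => c i p) then min b (w p) else b) b := by
  have comm : ∀ x ∈ (I.flatMap fun i => P.map fun p => (i, p)),
      ∀ y ∈ (I.flatMap fun i => P.map fun p => (i, p)), ∀ z : Nat,
      (fun b (ip : α × β) => if c ip.1 ip.2 then min b (w ip.2) else b)
        ((fun b ip => if c ip.1 ip.2 then min b (w ip.2) else b) z x) y
      = (fun b ip => if c ip.1 ip.2 then min b (w ip.2) else b)
        ((fun b ip => if c ip.1 ip.2 then min b (w ip.2) else b) z y) x := by
    intro x _ y _ z
    simp only
    cases c x.1 x.2 <;> cases c y.1 y.2 <;> simp [min_right_comm]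
  calc I.foldl (fun b i => P.foldl (fun b p => if c i p then min b (w p) else b) b) b
      = ((I.flatMap fun i => P.map fun p => (i, p)).foldl
          (fun b ip => if c ip.1 ip.2 then min b (w ip.2) else b) b) := by
        rw [List.foldl_flatMap]; simp only [List.foldl_map]
    _ = ((P.flatMap fun p => I.map fun i => (i, p)).foldl
          (fun b ip => if c ip.1 ip.2 then min b (w ip.2) else b) b) :=
        (pv_prod_swap I P).foldl_eq' comm b
    _ = P.foldl (fun b p => I.foldl (fun b i => if c i p then min b (w p) else b) b) b := by
        rw [List.foldl_flatMap]; simp only [List.foldl_map]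
    _ = P.foldl (fun b p => if I.any (fun i => c i p) then min b (w p) else b) b := by
        apply PySem.List.foldl_congr_mem
        intro acc p _
        exact pv_foldl_min_if I (fun i => c i p) (w p) acc

-- a nonempty pattern starts at some position of cs iff it is a substring of cs
lemma pv_any_startswith (cs pat : List Char) (hne : pat ≠ []) :
    (PySem.List.pyRange 0 (cs.length : Int) 1).any
      (fun i => PySem.Chars.startswith (cs.drop i.toNat) pat) = PySem.Chars.isIn pat cs := by
  cases h : PySem.Chars.isIn pat cs with
  | true =>
    obtain ⟨j, hj⟩ := (PySem.Chars.exists_prefix_drop_iff_isIn pat cs).mpr h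
    have hjlt : j < cs.length := by
      by_contra hge
      have : cs.drop j = [] := List.drop_eq_nil_of_le (by omega)
      rw [this, List.prefix_nil] at hj
      exact hne hj
    refine List.any_eq_true.mpr ⟨(j : Int), ?_, ?_⟩
    · exact PySem.List.mem_pyRange_one.mpr ⟨by positivity, by exact_mod_cast hjlt⟩
    · simpa using (PySem.Chars.startswith_iff (cs.drop j) pat).mpr hj
  | false =>
    refine List.any_eq_false.mpr ?_
    intro i hi hsw
    have hpre := (PySem.Chars.startswith_iff _ pat).mp hsw
    have : PySem.Chars.isIn pat cs = true :=
      (PySem.Chars.exists_prefix_drop_iff_isIn pat cs).mp ⟨i.toNat, hpre⟩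
    simp [h] at this

-- every pattern in the table is nonempty
lemma pv_patterns_ne : ∀ pp ∈ pvPatterns, pp.1.toList ≠ [] := by decide

-- the ten category pattern groups (the rows of Source B's table, as plain string lists)
def pvG0 : List String := ["ERROR_", "WSAE", "_ERR", "FAILED", "INVALID"]
def pvG1 : List String := ["WM_", "WS_", "SW_", "SWP_", "HWND_", "MSG_", "WINDOW", "DIALOG", "MENU", "BUTTON", "SCROLL"]
def pvG2 : List String := ["HKEY_", "REG_", "KEY_", "REGISTRY"]
def pvG3 : List String := ["CERT_", "CRYPT_", "SEC_", "AUTH_", "TRUST_", "SECURITY_", "PRIVILEGE_", "TOKEN_", "ACL_", "SID_"]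
def pvG4 : List String := ["FILE_", "DRIVE_", "VOLUME_", "DISK_", "DIRECTORY_", "FOLDER_", "PATH_", "GENERIC_READ", "GENERIC_WRITE"]
def pvG5 : List String := ["HTTP_", "DNS_", "TCP_", "UDP_", "IP_", "SOCKET_", "NET_", "INTERNET_", "WINHTTP_", "FTP_", "SMTP_"]
def pvG6 : List String := ["SQL_", "DB_", "DATABASE_", "ODBC_"]
def pvG7 : List String := ["DD", "D3D", "GDI_", "DIB_", "BMP_", "IMAGE_", "BITMAP_", "COLOR_", "BRUSH_", "PEN_", "FONT_"]
def pvG8 : List String := ["PROCESSOR_", "DEVICE_", "HARDWARE_", "SYSTEM_", "MACHINE_", "PLATFORM_", "ARCH_"]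
def pvG9 : List String := ["JOB_", "THREAD_", "PROCESS_", "HANDLE_", "WAIT_", "SYNCHRONIZE"]

lemma pv_patterns_groups :
    pvPatterns = (pvG0.map fun p => (p, 0)) ++ (pvG1.map fun p => (p, 1)) ++ (pvG2.map fun p => (p, 2))
      ++ (pvG3.map fun p => (p, 3)) ++ (pvG4.map fun p => (p, 4)) ++ (pvG5.map fun p => (p, 5))
      ++ (pvG6.map fun p => (p, 6)) ++ (pvG7.map fun p => (p, 7)) ++ (pvG8.map fun p => (p, 8))
      ++ (pvG9.map fun p => (p, 9)) := rfl

-- one group of the pattern fold collapses to a single conditional min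
lemma pv_group_fold (g : List String) (k : Nat) (u : List Char) (b : Nat) :
    (g.map fun p => (p, k)).foldl
      (fun b pp => if PySem.Chars.isIn pp.1.toList u then min b pp.2 else b) b
    = if g.any (fun p => PySem.Chars.isIn p.toList u) then min b k else b := by
  rw [List.foldl_map]
  exact pv_foldl_min_if g (fun p => PySem.Chars.isIn p.toList u) k b

-- the whole scanning loop of B computes the grouped conditional-min chain
set_option maxHeartbeats 2000000 in
lemma pv_alt_best (u : String) :
    (PySem.List.pyRange 0 (PySem.Str.len u) 1).foldl
      (fun best i => pvPatterns.foldl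
        (fun best pp =>
          if PySem.Chars.startswith (u.toList.drop i.toNat) pp.1.toList then min best pp.2 else best)
        best) 10
    = (fun b => if pvG9.any (fun p => PySem.Chars.isIn p.toList u.toList) then min b 9 else b)
      ((fun b => if pvG8.any (fun p => PySem.Chars.isIn p.toList u.toList) then min b 8 else b)
      ((fun b => if pvG7.any (fun p => PySem.Chars.isIn p.toList u.toList) then min b 7 else b)
      ((fun b => if pvG6.any (fun p => PySem.Chars.isIn p.toList u.toList) then min b 6 else b)
      ((fun b => if pvG5.any (fun p => PySem.Chars.isIn p.toList u.toList) then min b 5 else b)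
      ((fun b => if pvG4.any (fun p => PySem.Chars.isIn p.toList u.toList) then min b 4 else b)
      ((fun b => if pvG3.any (fun p => PySem.Chars.isIn p.toList u.toList) then min b 3 else b)
      ((fun b => if pvG2.any (fun p => PySem.Chars.isIn p.toList u.toList) then min b 2 else b)
      ((fun b => if pvG1.any (fun p => PySem.Chars.isIn p.toList u.toList) then min b 1 else b)
      ((fun b => if pvG0.any (fun p => PySem.Chars.isIn p.toList u.toList) then min b 0 else b)
        10))))))))) := by
  have hlen : PySem.Str.len u = (u.toList.length : Int) := by
    simp [PySem.Str.len]
  refine Eq.trans (pv_fold_swap (PySem.List.pyRange 0 (PySem.Str.len u) 1) pvPatterns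
    (fun i pp => PySem.Chars.startswith (u.toList.drop i.toNat) pp.1.toList)
    (fun pp => pp.2) 10) ?_
  refine Eq.trans (PySem.List.foldl_congr_mem pvPatterns _
    (fun b pp => if PySem.Chars.isIn pp.1.toList u.toList then min b pp.2 else b) 10 ?_) ?_
  · intro acc pp hpp
    rw [hlen, pv_any_startswith u.toList pp.1.toList (pv_patterns_ne pp hpp)]
  · rw [pv_patterns_groups]
    simp only [List.foldl_append]
    simp only [pv_group_fold]

-- the priority chain read through LABELS equals the first-match if-chain (pure Bool table fact)
lemma pv_table (a0 a1 a2 a3 a4 a5 a6 a7 a8 a9 : Bool) :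
    (if a0 then "errors" else if a1 then "windows" else if a2 then "registry"
      else if a3 then "security" else if a4 then "filesystem" else if a5 then "network"
      else if a6 then "database" else if a7 then "graphics" else if a8 then "system"
      else if a9 then "process" else ("miscellaneous" : String))
    = pvLabels.getD
      ((fun b => if a9 then min b 9 else b)
      ((fun b => if a8 then min b 8 else b)
      ((fun b => if a7 then min b 7 else b)
      ((fun b => if a6 then min b 6 else b)
      ((fun b => if a5 then min b 5 else b)
      ((fun b => if a4 then min b 4 else b)
      ((fun b => if a3 then min b 3 else b)
      ((fun b => if a2 then min b 2 else b)
      ((fun b => if a1 then min b 1 else b)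
      ((fun b => if a0 then min b 0 else b)
        10)))))))))) "miscellaneous" := by
  cases a0 <;> cases a1 <;> cases a2 <;> cases a3 <;> cases a4 <;>
    cases a5 <;> cases a6 <;> cases a7 <;> cases a8 <;> cases a9 <;> rfl

-- ===== VERDICT (by name: the statement is the Claim_ definition above) =====
set_option maxHeartbeats 2000000 in
theorem categorize_constant_spec : Claim_equal_categorize_constant := by
  intro s _
  unfold Spec_categorize_constant categorize_constant categorize_constant_alt
  simp only [PySem.Str.isIn_eq]
  rw [pv_alt_best (PySem.Str.upper s)]
  simp only [pvG0, pvG1, pvG2, pvG3, pvG4, pvG5, pvG6, pvG7, pvG8, pvG9]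
  exact pv_table _ _ _ _ _ _ _ _ _ _
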